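-- pv_equiv track=rewrite | github.com/gabrieldsmarques/listas | lista4/ex04.py | indice_maior_elemento
-- ===== SOURCE A (Python) =====
-- def indice_maior_elemento(lista):
--
--     if len(lista) <= 1:
--
--         return 0 ## se a lista so tem 1 elemento, o indice zero já é o maior
--
--     else:
--
--         indice_maior_restante = indice_maior_elemento(lista[1:]) ## variavel pra guardar o indice do maior elemento atual.
--
--         if lista[0] > lista[1 + indice_maior_restante]: #comparacao do primeiro elemento com o maior atual, o +1 serve pra ajustar o indice, porque o indice da variavel e relativo ao segundo elemento da lista, assim se desajustando do comum, precisando do +1 pra "endireitar"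
--
--             return 0 # se o maior elemento for o indice zero, continua retornando zero
--
--         else:
--
--             return indice_maior_restante + 1 #se nao, retorna a variavel com maior indice ajustada pra encaixar com a lista original, pra isso serve o +1
-- ===== SOURCE B (Python) =====
-- def indice_maior_elemento(lista):
--     if not lista:
--         return 0
--     m = max(lista)
--     return len(lista) - 1 - lista[::-1].index(m)
-- ===== Notes on version B (the rewrite author's own statement) =====
-- stated objective: faster
-- what changed: Replaces A's recursive traversal (which copies lista[1:] at every level and tracks value and index together) with two flat passes: compute max(lista) once, then locate its rightmost occurrence via a reverse index.
import Mathlib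
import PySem

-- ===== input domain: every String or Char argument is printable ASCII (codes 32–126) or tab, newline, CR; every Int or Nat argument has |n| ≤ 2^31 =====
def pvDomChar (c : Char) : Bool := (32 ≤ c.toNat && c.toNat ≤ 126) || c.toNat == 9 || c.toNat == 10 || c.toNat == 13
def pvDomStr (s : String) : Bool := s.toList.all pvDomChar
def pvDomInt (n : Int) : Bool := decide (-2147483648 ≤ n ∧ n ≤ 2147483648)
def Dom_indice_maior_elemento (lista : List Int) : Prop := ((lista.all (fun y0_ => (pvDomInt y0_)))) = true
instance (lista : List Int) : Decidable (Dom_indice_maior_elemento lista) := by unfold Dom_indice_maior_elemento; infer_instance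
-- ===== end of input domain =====

-- B computes max(lista) once then locates its rightmost occurrence by a reverse index,
-- instead of A's recursive traversal; both agree everywhere (return value only, no mutation).

-- ===== PORT A =====
def indice_maior_elemento (lista : List Int) : Int :=
  match lista with
  | [] => 0
  | [_] => 0
  | a :: b :: rest =>
      let indice_maior_restante := indice_maior_elemento (b :: rest)
      -- lista[1 + indice_maior_restante]: the index is always in range, so pyGet? is some
      if a > (PySem.List.pyGet? (a :: b :: rest) (1 + indice_maior_restante)).getD 0 then 0
      else indice_maior_restante + 1

-- ===== PORT B =====
def indice_maior_elemento_alt (lista : List Int) : Int :=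
  if lista = [] then 0
  else
    -- m = max(lista): some since lista ≠ []
    let m := (PySem.List.max? lista (fun y => y)).getD 0
    -- lista[::-1]: step -1 ≠ 0, so slice? is some
    let rev := (PySem.List.slice? lista none none (-1)).getD []
    -- rev.index(m): m ∈ rev always, so index? is some
    (lista.length : Int) - 1 - (((PySem.List.index? rev m).getD 0 : Nat) : Int)

-- ===== PRECONDITION & SPEC =====
def Spec_indice_maior_elemento (lista : List Int) (out : Int) : Prop := out = indice_maior_elemento_alt lista
instance (lista : List Int) (out : Int) : Decidable (Spec_indice_maior_elemento lista out) := by unfold Spec_indice_maior_elemento; infer_instance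

-- ===== CLAIM (what is proved, stated in full; the proofs are below) =====
def Claim_equal_indice_maior_elemento : Prop := ∀ (lista : List Int), Dom_indice_maior_elemento lista → Spec_indice_maior_elemento lista (indice_maior_elemento lista)

-- ===== LEMMAS AND PROOFS =====

lemma foldl_max_comm (t : List Int) : ∀ (a b : Int), t.foldl max (max a b) = max a (t.foldl max b) := by
  induction t with
  | nil => intro a b; rfl
  | cons c t ih =>
      intro a b
      simp only [List.foldl_cons]
      rw [max_assoc, ih]

-- A's recursion computes len - 1 - (index of the max in the reversed list)
lemma A_char : ∀ (l : List Int) (m : Int) (k : Nat),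
    PySem.List.max? l (fun y => y) = some m →
    PySem.List.index? l.reverse m = some k →
    indice_maior_elemento l = (l.length : Int) - 1 - k := by
  intro l
  induction l with
  | nil =>
      intro m k hm hk
      rw [(PySem.List.max?_eq_none_iff ([] : List Int) (fun y => y)).mpr rfl] at hm
      cases hm
  | cons a t ih =>
      intro m k hm hk
      cases t with
      | nil =>
          rw [PySem.List.max?_id_cons] at hm
          simp at hm
          subst hm
          rw [List.reverse_singleton, PySem.List.index?_cons_self] at hk
          simp at hk
          subst hk
          simp [indice_maior_elemento]
      | cons b rest =>
          -- the maximum of the tail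
          set mt := rest.foldl max b with hmt
          have hmaxt : PySem.List.max? (b :: rest) (fun y => y) = some mt :=
            PySem.List.max?_id_cons b rest
          -- mt ∈ tail, hence in its reverse
          have hmem : mt ∈ (b :: rest) := PySem.List.max?_mem hmaxt
          have hmemr : mt ∈ (b :: rest).reverse := List.mem_reverse.mpr hmem
          obtain ⟨kt, hkt⟩ : ∃ kt, PySem.List.index? (b :: rest).reverse mt = some kt := by
            have := (PySem.List.index?_isSome_iff (xs := (b :: rest).reverse) (v := mt)).2 hmemr
            exact Option.isSome_iff_exists.mp this
          have ihv := ih mt kt hmaxt hkt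
          obtain ⟨hklt, hrev, -⟩ := PySem.List.getElem_of_index?_eq_some hkt
          have hklen : kt < (b :: rest).length := by simpa using hklt
          have htval : (b :: rest)[(b :: rest).length - 1 - kt]'(by omega) = mt := by
            rw [← hrev]; rw [List.getElem_reverse]
          have hlen : (b :: rest).length = rest.length + 1 := rfl
          -- the tested element lista[1 + r] is mt
          have hget : PySem.List.pyGet? (a :: b :: rest) (1 + ((((b :: rest).length : Int)) - 1 - kt)) = some mt := by
            have h0 : (0:Int) ≤ 1 + (((b :: rest).length : Int) - 1 - kt) := by
              have : (kt : Int) < (b :: rest).length := by exact_mod_cast hklen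
              omega
            have h1 : 1 + (((b :: rest).length : Int) - 1 - kt) < ((a :: b :: rest).length : Int) := by
              simp only [List.length_cons]; push_cast; omega
            rw [PySem.List.pyGet?_eq_some_getElem _ h0 h1]
            have hnat : (1 + (((b :: rest).length : Int) - 1 - (kt : Int))).toNat
                = ((b :: rest).length - 1 - kt) + 1 := by
              simp only [List.length_cons]
              omega
            simp only [hnat, List.getElem_cons_succ, htval]
          -- the overall maximum is max a mt
          have hmax : m = max a mt := by
            rw [PySem.List.max?_id_cons] at hm
            simp only [List.foldl_cons] at hm
            have := foldl_max_comm rest a b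
            rw [this] at hm
            exact (Option.some_inj.mp hm).symm
          have hisMax : ∀ y ∈ (b :: rest), y ≤ mt := by
            intro y hy
            have := PySem.List.max?_isMax hmaxt y hy
            simpa using this
          -- unfold A one step
          show (if a > (PySem.List.pyGet? (a :: b :: rest)
                  (1 + indice_maior_elemento (b :: rest))).getD 0 then (0:Int)
                else indice_maior_elemento (b :: rest) + 1)
              = ((a :: b :: rest).length : Int) - 1 - k
          rw [ihv, hget]
          simp only [Option.getD_some]
          by_cases hcmp : a > mt
          · -- a is a strict new maximum: rightmost occurrence is index 0
            rw [if_pos hcmp]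
            have hnot : a ∉ (b :: rest).reverse := by
              intro hmem'
              have : a ≤ mt := hisMax a (List.mem_reverse.mp hmem')
              omega
            have : PySem.List.index? ((a :: b :: rest)).reverse m = some (b :: rest).reverse.length := by
              rw [List.reverse_cons]
              rw [hmax, max_eq_left (le_of_lt hcmp)]
              exact PySem.List.index?_append_singleton_self _ a hnot
            rw [this] at hk
            have hkv : k = (b :: rest).length := by simpa using hk.symm
            subst hkv
            simp only [List.length_cons]
            push_cast
            omega
          · -- max stays in the tail: index shifts by one
            rw [if_neg hcmp]
            have : PySem.List.index? ((a :: b :: rest)).reverse m = some kt := by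
              rw [List.reverse_cons]
              rw [hmax, max_eq_right (by omega)]
              rw [PySem.List.index?_append_of_mem _ hmemr]
              exact hkt
            rw [this] at hk
            have hkv : k = kt := by simpa using hk.symm
            subst hkv
            simp only [List.length_cons]
            push_cast
            omega

-- ===== VERDICT (by name: the statement is the Claim_ definition above) =====
theorem indice_maior_elemento_spec : Claim_equal_indice_maior_elemento := by
  intro lista _
  unfold Spec_indice_maior_elemento indice_maior_elemento_alt
  rcases heq : lista with _ | ⟨a, t⟩
  · simp [indice_maior_elemento]
  · rw [if_neg (by simp)]
    have hmax : ∃ m, PySem.List.max? (a :: t) (fun y => y) = some m := by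
      rcases h : PySem.List.max? (a :: t) (fun y => y) with _ | m
    -- max? of a nonempty list is some
      · exact absurd ((PySem.List.max?_eq_none_iff _ _).mp h) (by simp)
      · exact ⟨m, rfl⟩
    obtain ⟨m, hm⟩ := hmax
    have hmem : m ∈ (a :: t) := PySem.List.max?_mem hm
    obtain ⟨k, hk⟩ : ∃ k, PySem.List.index? (a :: t).reverse m = some k := by
      have := (PySem.List.index?_isSome_iff (xs := (a :: t).reverse) (v := m)).2 (List.mem_reverse.mpr hmem)
      exact Option.isSome_iff_exists.mp this
    rw [A_char (a :: t) m k hm hk, PySem.List.slice?_none_none_neg_one, hm]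
    simp only [Option.getD_some]
    rw [hk]
    simp only [Option.getD_some]
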